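-- pv_equiv track=rewrite | github.com/suboty/ret | research/coevolutionary_optimization/coevolutionary/utils/translators.py | lexical_analyzer
-- ===== SOURCE A (Python) =====
-- def lexical_analyzer(string):
--     sep_symbols = ['(', ')', ',']
--     tokens = []
--     _current_token = ''
--     for symbol in string:
--         if symbol in sep_symbols:
--             if _current_token != '':
--                 tokens.append(_current_token)
--             tokens.append(symbol)
--             _current_token = ''
--         else:
--             _current_token += symbol
--     return tokens
-- ===== SOURCE B (Python) =====
-- def lexical_analyzer(string):
--     seps = '(),'
--     tokens = []
--     i = 0
--     n = len(string)
--     while i < n: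
--         j = i
--         while j < n and string[j] not in seps:
--             j += 1
--         if j == n:
--             break
--         if j > i:
--             tokens.append(string[i:j])
--         tokens.append(string[j])
--         i = j + 1
--     return tokens
-- ===== Notes on version B (the rewrite author's own statement) =====
-- stated objective: alternative
-- what changed: Replaced the per-character accumulator fold with a span scanner that jumps from separator to separator and slices each maximal non-separator run out of the string directly (no growing token buffer per character).
import Mathlib
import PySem

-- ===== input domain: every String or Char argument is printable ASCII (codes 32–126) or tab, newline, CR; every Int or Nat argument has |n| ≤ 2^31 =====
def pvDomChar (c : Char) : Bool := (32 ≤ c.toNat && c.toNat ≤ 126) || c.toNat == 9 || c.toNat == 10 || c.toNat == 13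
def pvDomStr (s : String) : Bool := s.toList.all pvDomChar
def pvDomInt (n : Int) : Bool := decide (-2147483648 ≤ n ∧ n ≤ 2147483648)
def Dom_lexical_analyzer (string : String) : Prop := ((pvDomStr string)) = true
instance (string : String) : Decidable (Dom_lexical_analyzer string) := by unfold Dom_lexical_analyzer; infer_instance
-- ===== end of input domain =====

-- B replaces A's per-character accumulator loop by a separator-to-separator span scanner (alternative, same cost).

-- ===== PORT A =====
-- state: (tokens, _current_token); the current token accumulates as a List Char (Python string +=)
def lexical_analyzer (string : String) : List String :=
  (string.toList.foldl
    (fun (st : List String × List Char) (symbol : Char) =>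
      if symbol ∈ ['(', ')', ','] then
        (st.1 ++ (if st.2 ≠ [] then [String.mk st.2] else []) ++ [String.mk [symbol]], [])
      else
        (st.1, st.2 ++ [symbol]))
    ([], [])).1

-- ===== PORT B =====
def pvIsSep (c : Char) : Bool := decide (c ∈ ['(', ')', ','])

-- the inner j-scan of Source B is the takeWhile/dropWhile span; slicing string[i:j] is String.mk of the span
def lexical_analyzer_alt_go (cs : List Char) : List String :=
  let tok := cs.takeWhile (fun c => !pvIsSep c)
  match h : cs.dropWhile (fun c => !pvIsSep c) with
  | [] => []
  | s :: rs =>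
    (if tok = [] then [] else [String.mk tok]) ++ String.mk [s] :: lexical_analyzer_alt_go rs
termination_by cs.length
decreasing_by
  have hle := List.length_dropWhile_le (p := fun c => !pvIsSep c) (l := cs)
  rw [h] at hle
  simp at hle
  omega

def lexical_analyzer_alt (string : String) : List String :=
  lexical_analyzer_alt_go string.toList

-- ===== PRECONDITION & SPEC =====
def Spec_lexical_analyzer (string : String) (out : List String) : Prop := out = lexical_analyzer_alt string
instance (string : String) (out : List String) : Decidable (Spec_lexical_analyzer string out) := by unfold Spec_lexical_analyzer; infer_instance

-- ===== CLAIM (what is proved, stated in full; the proofs are below) =====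
def Claim_equal_lexical_analyzer : Prop := ∀ (string : String), Dom_lexical_analyzer string → Spec_lexical_analyzer string (lexical_analyzer string)

-- ===== LEMMAS AND PROOFS =====

-- A's loop body, written as a recursion on the remaining characters with the pending token as state
def pvGoChar : List Char → List Char → List String
  | _, [] => []
  | cur, c :: cs =>
    if c ∈ ['(', ')', ','] then
      (if cur ≠ [] then [String.mk cur] else []) ++ String.mk [c] :: pvGoChar [] cs
    else
      pvGoChar (cur ++ [c]) cs

theorem pvFoldl_eq_goChar (cs : List Char) : ∀ (acc : List String) (cur : List Char),
    (cs.foldl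
      (fun (st : List String × List Char) (symbol : Char) =>
        if symbol ∈ ['(', ')', ','] then
          (st.1 ++ (if st.2 ≠ [] then [String.mk st.2] else []) ++ [String.mk [symbol]], [])
        else
          (st.1, st.2 ++ [symbol]))
      (acc, cur)).1 = acc ++ pvGoChar cur cs := by
  induction cs with
  | nil => simp [pvGoChar]
  | cons c cs ih =>
    intro acc cur
    rw [List.foldl_cons]
    by_cases hc : c ∈ ['(', ')', ',']
    · rw [if_pos hc, ih]
      simp [pvGoChar, hc]
    · rw [if_neg hc, ih]
      simp [pvGoChar, hc]

theorem pvGoChar_span (cs : List Char) : ∀ (cur : List Char),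
    pvGoChar cur cs =
      match cs.dropWhile (fun c => !pvIsSep c) with
      | [] => []
      | s :: rs =>
        (if cur ++ cs.takeWhile (fun c => !pvIsSep c) = [] then []
         else [String.mk (cur ++ cs.takeWhile (fun c => !pvIsSep c))]) ++
          String.mk [s] :: pvGoChar [] rs := by
  induction cs with
  | nil => intro cur; simp [pvGoChar]
  | cons c cs ih =>
    intro cur
    by_cases hc : c ∈ ['(', ')', ',']
    · have hs : pvIsSep c = true := by simp [pvIsSep, hc]
      simp [pvGoChar, hc, List.dropWhile, List.takeWhile, hs]
    · have hs : pvIsSep c = false := by simp [pvIsSep, hc]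
      simp [pvGoChar, hc, List.dropWhile, List.takeWhile, hs, ih]

theorem pvGoChar_eq_alt_go (n : Nat) : ∀ (cs : List Char), cs.length ≤ n →
    pvGoChar [] cs = lexical_analyzer_alt_go cs := by
  induction n with
  | zero =>
    intro cs hn
    have : cs = [] := List.eq_nil_of_length_eq_zero (Nat.le_zero.mp hn)
    subst this
    simp [pvGoChar, lexical_analyzer_alt_go]
  | succ n ih =>
    intro cs hn
    rw [pvGoChar_span, lexical_analyzer_alt_go]
    have hle := List.length_dropWhile_le (p := fun c => !pvIsSep c) (l := cs)
    cases h : cs.dropWhile (fun c => !pvIsSep c) with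
    | nil => simp
    | cons s rs =>
      rw [h] at hle
      simp only [List.length_cons] at hle
      have : rs.length ≤ n := by omega
      simp [ih rs this]

-- ===== VERDICT (by name: the statement is the Claim_ definition above) =====
theorem lexical_analyzer_spec : Claim_equal_lexical_analyzer := by
  intro s _
  unfold Spec_lexical_analyzer lexical_analyzer lexical_analyzer_alt
  rw [pvFoldl_eq_goChar, pvGoChar_eq_alt_go s.toList.length s.toList (le_refl _)]
  simp
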